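-- pv_equiv track=rewrite | github.com/aman1108/Interview-Coding-Questions | Dynamic Programming/Repeating-subsequence.py | solve
-- ===== SOURCE A (Python) =====
-- def solve(A):
--     n=len(A)
--     for i in range(n):
--         count=0
--         for j in range(n-i):
--             if (j==i+j):
--                 continue
--             if (A[j]==A[i+j]):
--                 count=count+1
--         if (count>=2):
--             return 1
--     return 0
-- ===== SOURCE B (Python) =====
-- def solve(A):
--     positions = {}
--     for i, c in enumerate(A):
--         positions.setdefault(c, []).append(i)
--     seen = set()
--     for idx in positions.values():
--         while idx:
--             p, idx = idx[0], idx[1:]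
--             for q in idx:
--                 d = q - p
--                 if d in seen:
--                     return 1
--                 seen.add(d)
--     return 0
-- ===== Notes on version B (the rewrite author's own statement) =====
-- stated objective: alternative
-- what changed: A scans every distance i and counts positional matches at that distance (O(n^2) passes); B instead groups indices by character once, then enumerates same-character index pairs, recording each pair's distance in a set and answering 1 on the first repeated distance - by pigeonhole at most n pairs are ever examined.
import Mathlib
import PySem

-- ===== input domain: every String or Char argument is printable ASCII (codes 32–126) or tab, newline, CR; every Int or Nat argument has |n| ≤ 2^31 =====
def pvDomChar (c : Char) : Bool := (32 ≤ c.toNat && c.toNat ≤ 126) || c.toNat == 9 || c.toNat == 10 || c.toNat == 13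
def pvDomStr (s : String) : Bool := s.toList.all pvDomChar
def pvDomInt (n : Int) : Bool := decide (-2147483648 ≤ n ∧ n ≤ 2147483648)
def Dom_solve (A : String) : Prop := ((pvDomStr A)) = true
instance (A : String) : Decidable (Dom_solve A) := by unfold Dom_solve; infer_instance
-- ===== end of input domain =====

-- B replaces A's per-distance counting scan by grouping indices per character and
-- detecting a repeated pair distance with a seen-set (alternative algorithm; return value only).

-- ===== PORT A =====
-- inner loop: count = number of j in range(n-i) with j != i+j and A[j] == A[i+j]
def solveCount (l : List Char) (n i : Int) : Int :=
  (PySem.List.pyRange 0 (n - i) 1).foldl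
    (fun c j =>
      if j = i + j then c
      else if PySem.List.pyGet? l j = PySem.List.pyGet? l (i + j) then c + 1 else c) 0

-- outer loop: for i in range(n): if count >= 2: return 1; fallthrough returns 0
def solveLoopA (l : List Char) (n : Int) : List Int → Int
  | [] => 0
  | i :: is => if 2 ≤ solveCount l n i then 1 else solveLoopA l n is

def solve (A : String) : Int :=
  let l := A.toList
  let n : Int := l.length
  solveLoopA l n (PySem.List.pyRange 0 n 1)

-- ===== PORT B =====
-- positions.setdefault(c, []).append(i)  over enumerate(A)
def grpB (l : List Char) : PySem.Dict Char (List Int) :=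
  (PySem.List.enumerate l 0).foldl
    (fun d p => d.modify p.2 [] (fun v => v ++ [p.1])) PySem.Dict.empty

-- 'for q in idx: d = q - p; if d in seen: return 1; seen.add(d)'
def scanOne (p : Int) : List Int → PySem.Set Int → Option (PySem.Set Int)
  | [], s => some s
  | q :: qs, s =>
      if PySem.Set.contains s (q - p) then none
      else scanOne p qs (PySem.Set.add s (q - p))

-- 'while idx: p, idx = idx[0], idx[1:]; …'
def scanGroup : List Int → PySem.Set Int → Option (PySem.Set Int)
  | [], s => some s
  | p :: rest, s =>
      match scanOne p rest s with
      | none => none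
      | some s' => scanGroup rest s'

-- 'for idx in positions.values(): …' with early return 1, final return 0
def scanGroups : List (List Int) → PySem.Set Int → Int
  | [], _ => 0
  | g :: gs, s =>
      match scanGroup g s with
      | none => 1
      | some s' => scanGroups gs s'

def solve_alt (A : String) : Int :=
  scanGroups (PySem.Dict.values (grpB A.toList)) PySem.Set.empty

-- ===== PRECONDITION & SPEC =====
def Spec_solve (A : String) (out : Int) : Prop := out = solve_alt A
instance (A : String) (out : Int) : Decidable (Spec_solve A out) := by unfold Spec_solve; infer_instance

-- ===== CLAIM (what is proved, stated in full; the proofs are below) =====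
def Claim_equal_solve : Prop := ∀ (A : String), Dom_solve A → Spec_solve A (solve A)

-- ===== LEMMAS AND PROOFS =====

-- proof-side: a linear scan over a flat list of distances
def scanFlat : List Int → PySem.Set Int → Option (PySem.Set Int)
  | [], s => some s
  | d :: ds, s =>
      if PySem.Set.contains s d then none else scanFlat ds (PySem.Set.add s d)

-- proof-side: the stream of distances of all ordered pairs of xs
def pairsOf : List Int → List Int
  | [] => []
  | p :: rest => rest.map (· - p) ++ pairsOf rest

-- proof-side: number of matches at distance d
def mcount (l : List Char) (d : Nat) : Nat :=
  (List.range (l.length - d)).countP (fun j => l[j]? == l[j + d]?)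

-- proof-side: indices (as Int) of character c in l, as built by grpB
def Ec (l : List Char) (c : Char) : List Int :=
  ((PySem.List.enumerate l 0).filter (fun p => p.2 == c)).map (·.1)

-- proof-side: the full distance stream of B
def distsB (l : List Char) : List Int :=
  (PySem.Dict.values (grpB l)).flatMap pairsOf

theorem scanOne_eq (p : Int) (qs : List Int) (s : PySem.Set Int) :
    scanOne p qs s = scanFlat (qs.map (· - p)) s := by
  induction qs generalizing s with
  | nil => rfl
  | cons q qs ih => simp only [scanOne, List.map_cons, scanFlat, ih]


theorem scanFlat_append (xs ys : List Int) (s : PySem.Set Int) :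
    scanFlat (xs ++ ys) s = (scanFlat xs s).bind (fun s' => scanFlat ys s') := by
  induction xs generalizing s with
  | nil => rfl
  | cons d ds ih =>
      simp only [List.cons_append, scanFlat]
      split_ifs with h
      · rfl
      · exact ih _


theorem scanGroup_eq (g : List Int) (s : PySem.Set Int) :
    scanGroup g s = scanFlat (pairsOf g) s := by
  induction g generalizing s with
  | nil => rfl
  | cons p rest ih =>
      simp only [scanGroup, pairsOf, scanOne_eq, scanFlat_append]
      cases scanFlat (rest.map (· - p)) s with
      | none => rfl
      | some s' => simpa using ih s'


theorem scanGroups_eq (gs : List (List Int)) (s : PySem.Set Int) :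
    scanGroups gs s = match scanFlat (gs.flatMap pairsOf) s with
      | none => 1 | some _ => 0 := by
  induction gs generalizing s with
  | nil => rfl
  | cons g gs ih =>
      simp only [scanGroups, List.flatMap_cons, scanGroup_eq, scanFlat_append]
      cases scanFlat (pairsOf g) s with
      | none => rfl
      | some s' => simpa using ih s'


theorem scanFlat_none_iff (ds : List Int) (s : PySem.Set Int) :
    scanFlat ds s = none ↔ ¬ (ds.Nodup ∧ ∀ d ∈ ds, d ∉ s) := by
  induction ds generalizing s with
  | nil => simp [scanFlat]
  | cons d ds ih =>
      simp only [scanFlat]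
      split_ifs with h
      · rw [PySem.Set.contains_iff] at h
        simp only [List.nodup_cons, List.mem_cons]
        tauto
      · rw [ih]
        have hd : d ∉ s := fun hm => h ((PySem.Set.contains_iff s d).mpr hm)
        simp only [List.nodup_cons, List.mem_cons, PySem.Set.mem_add]
        constructor
        · intro hne hcon
          obtain ⟨⟨hnd, hnds⟩, hall⟩ := hcon
          apply hne
          refine ⟨hnds, ?_⟩
          intro e he hm
          rcases hm with h1 | rfl
          · exact hall e (Or.inr he) h1
          · exact hnd he
        · intro hne hcon
          obtain ⟨hnds, hall⟩ := hcon
          apply hne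
          refine ⟨⟨?_, hnds⟩, ?_⟩
          · intro hdds; exact hall d hdds (Or.inr rfl)
          · intro e hm
            rcases hm with rfl | he
            · exact hd
            · intro hes; exact hall e he (Or.inl hes)

theorem solve_alt_eq (A : String) :
    solve_alt A = if (distsB A.toList).Nodup then 0 else 1 := by
  have h := scanFlat_none_iff (distsB A.toList) PySem.Set.empty
  simp only [solve_alt, scanGroups_eq]
  change (match scanFlat (distsB A.toList) PySem.Set.empty with | none => (1:Int) | some _ => 0) = _
  have hemp : ∀ d : Int, d ∉ (PySem.Set.empty : PySem.Set Int) := by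
    intro d hm; simp [PySem.Set.empty] at hm
  by_cases hn : (distsB A.toList).Nodup
  · have : scanFlat (distsB A.toList) PySem.Set.empty ≠ none := by
      intro hc
      exact (h.mp hc) ⟨hn, fun d _ => hemp d⟩
    cases hs : scanFlat (distsB A.toList) PySem.Set.empty with
    | none => exact absurd hs this
    | some s' => simp [hn]
  · have : scanFlat (distsB A.toList) PySem.Set.empty = none := by
      apply h.mpr; intro ⟨hnd, _⟩; exact hn hnd
    rw [this]; simp [hn]


theorem solveLoopA_eq (l : List Char) (n : Int) (is : List Int) :
    solveLoopA l n is = if is.any (fun i => decide (2 ≤ solveCount l n i)) then 1 else 0 := by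
  induction is with
  | nil => rfl
  | cons i is ih =>
      simp only [solveLoopA, List.any_cons, ih]
      by_cases h : 2 ≤ solveCount l n i <;> simp [h]

theorem solveCount_zero (l : List Char) (n : Int) : solveCount l n 0 = 0 := by
  unfold solveCount
  rw [PySem.List.foldl_congr_mem _ _ (fun c _ => c) 0
    (by intro acc j _; simp)]
  simp

theorem solveCount_pos (l : List Char) (d : Nat) (hd : 1 ≤ d) :
    solveCount l (l.length : Int) (d : Int) = (mcount l d : Int) := by
  unfold solveCount
  rw [PySem.List.foldl_congr_mem _ _
      (fun c j => if PySem.List.pyGet? l j = PySem.List.pyGet? l ((d : Int) + j) then c + 1 else c) 0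
      (by
        intro acc j _
        have hne : ¬ (j = (d : Int) + j) := by omega
        simp [hne])]
  rw [PySem.List.foldl_ite_add_one
      (p := fun j => PySem.List.pyGet? l j = PySem.List.pyGet? l ((d : Int) + j))]
  rw [zero_add]
  by_cases hdn : d ≤ l.length
  · rw [show (l.length : Int) - (d : Int) = ((l.length - d : Nat) : Int) by omega]
    rw [PySem.List.pyRange_zero_natCast]
    rw [List.countP_map]
    rw [Nat.cast_inj]
    unfold mcount
    apply List.countP_congr
    intro k hk
    rw [List.mem_range] at hk
    simp only [Function.comp_apply]
    rw [PySem.List.pyGet?_natCast]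
    rw [show ((d : Int) + (k : Int)) = ((d + k : Nat) : Int) by push_cast; ring]
    rw [PySem.List.pyGet?_natCast]
    rw [Nat.add_comm d k]
    simp [beq_iff_eq]
  · have h1 : PySem.List.pyRange 0 ((l.length : Int) - (d : Int)) 1 = [] := by
      rw [List.eq_nil_iff_forall_not_mem]
      intro x hx
      rw [PySem.List.mem_pyRange_one] at hx
      omega
    rw [h1]
    unfold mcount
    rw [show l.length - d = 0 by omega]
    rfl


theorem grp_getD (l : List Char) (c : Char) :
    (grpB l).getD c [] = Ec l c := by
  unfold grpB Ec
  rw [show (fun (d : PySem.Dict Char (List Int)) (p : Int × Char) =>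
        d.modify p.2 [] (fun v => v ++ [p.1]))
      = (fun d p => ((fun (d : PySem.Dict Char (List Int)) (q : Char × Int) =>
        d.modify q.1 [] (fun v => v ++ [q.2])) d (Prod.swap p))) from rfl]
  rw [← List.foldl_map (f := Prod.swap)
      (g := fun (d : PySem.Dict Char (List Int)) (q : Char × Int) => d.modify q.1 [] (fun v => v ++ [q.2]))]
  rw [PySem.Dict.getD_foldl_modify_append]
  rw [PySem.Dict.getD_empty]
  rw [List.filter_map]
  simp only [List.map_map, List.nil_append]
  rfl

theorem grp_keys (l : List Char) : (grpB l).keys = PySem.Set.ofList l := by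
  unfold grpB
  rw [show (fun (d : PySem.Dict Char (List Int)) (p : Int × Char) =>
        d.modify p.2 [] (fun v => v ++ [p.1]))
      = (fun d p => d.modify ((fun (q : Int × Char) => q.2) p) []
          ((fun (_ : PySem.Dict Char (List Int)) (p : Int × Char) (v : List Int) => v ++ [p.1]) d p)) from rfl]
  rw [PySem.Dict.keys_foldl_modify_key]
  rw [PySem.List.map_snd_enumerate, PySem.Dict.keys_empty]
  rw [PySem.Set.ofList_eq_foldl]
  rfl

theorem grp_values (l : List Char) :
    (grpB l).values = (PySem.Set.ofList l).map (Ec l) := by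
  rw [PySem.Dict.values_eq_map_keys (grpB l)
    (by rw [grp_keys]; exact PySem.Set.nodup_ofList l) []]
  rw [grp_keys]
  exact List.map_congr_left (fun c _ => grp_getD l c)

theorem mem_Ec (l : List Char) (c : Char) (a : Int) :
    a ∈ Ec l c ↔ ∃ k : Nat, k < l.length ∧ a = (k : Int) ∧ l[k]? = some c := by
  unfold Ec
  simp only [List.mem_map, List.mem_filter, PySem.List.mem_enumerate_iff]
  constructor
  · rintro ⟨p, ⟨⟨k, hk, rfl⟩, hc⟩, rfl⟩
    refine ⟨k, hk, by simp, ?_⟩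
    simp only [beq_iff_eq] at hc
    simp [List.getElem?_eq_getElem hk, hc]
  · rintro ⟨k, hk, rfl, hsome⟩
    have hkc : l[k] = c := by
      have := List.getElem?_eq_getElem hk
      rw [this] at hsome; exact Option.some_injective _ hsome
    exact ⟨(0 + (k : Int), l[k]), ⟨⟨k, hk, rfl⟩, by simp [hkc]⟩, by simp⟩


theorem pairwise_Ec (l : List Char) (c : Char) : (Ec l c).Pairwise (· < ·) := by
  unfold Ec
  refine List.Pairwise.map _ (fun a b h => h) ?_
  exact (PySem.List.pairwise_lt_enumerate l 0).filter _


theorem count_pairsOf (xs : List Int) (hp : xs.Pairwise (· < ·)) (d : Int) (hd : 1 ≤ d) :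
    (pairsOf xs).count d = xs.countP (fun a => decide (a + d ∈ xs)) := by
  induction xs with
  | nil => rfl
  | cons p rest ih =>
      obtain ⟨hlt, hrest⟩ := List.pairwise_cons.mp hp
      have hnd : rest.Nodup := hrest.imp (fun h => ne_of_lt h)
      rw [pairsOf, List.count_append]
      have hinj : Function.Injective (fun x : Int => x - p) := fun a b h => by
        simpa using h
      have hcmap : (rest.map (fun x => x - p)).count d = rest.count (p + d) := by
        have := List.count_map_of_injective rest (fun x => x - p) hinj (p + d)
        simpa [show p + d - p = d by ring] using this
      have hcnt : rest.count (p + d) = if p + d ∈ rest then 1 else 0 := by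
        split_ifs with hm
        · exact List.count_eq_one_of_mem hnd hm
        · exact List.count_eq_zero_of_not_mem hm
      rw [hcmap, ih hrest, hcnt, List.countP_cons]
      have h2 : rest.countP (fun a => decide (a + d ∈ p :: rest))
          = rest.countP (fun a => decide (a + d ∈ rest)) := by
        apply List.countP_congr
        intro a ha
        simp only [List.mem_cons, decide_eq_true_eq]
        constructor
        · rintro (h | h)
          · exact absurd h (by have := hlt a ha; omega)
          · exact h
        · exact Or.inr
      have h1 : (decide (p + d ∈ p :: rest)) = (decide (p + d ∈ rest)) := by
        simp only [List.mem_cons, decide_eq_decide]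
        constructor
        · rintro (h | h)
          · exact absurd h (by omega)
          · exact h
        · exact Or.inr
      rw [h2, h1]
      by_cases hm : p + d ∈ rest <;> simp [hm] <;> omega


theorem mem_pairsOf_bounds (n : Int) (xs : List Int) (hp : xs.Pairwise (· < ·))
    (hb : ∀ x ∈ xs, 0 ≤ x ∧ x < n) : ∀ e ∈ pairsOf xs, 1 ≤ e ∧ e < n := by
  revert hp hb
  induction xs with
  | nil => intro _ _ e he; simp [pairsOf] at he
  | cons p rest ih =>
      intro hp hb e he
      obtain ⟨hlt, hrest⟩ := List.pairwise_cons.mp hp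
      rw [pairsOf] at he
      rcases List.mem_append.mp he with hm | hm
      · obtain ⟨x, hx, rfl⟩ := List.mem_map.mp hm
        have h1 := hlt x hx
        have h2 := hb x (List.mem_cons_of_mem _ hx)
        have h3 := (hb p (List.mem_cons_self)).1
        constructor <;> omega
      · exact ih hrest (fun x hx => hb x (List.mem_cons_of_mem _ hx)) e hm


theorem countP_split {α : Type} (xs : List α) (Q R : α → Bool) :
    xs.countP (fun a => Q a && R a) + xs.countP (fun a => Q a && !R a) = xs.countP Q := by
  induction xs with
  | nil => rfl
  | cons a xs ih =>
      simp only [List.countP_cons]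
      cases hq : Q a <;> cases hr : R a <;> simp [hq, hr] <;> omega


theorem sum_countP_partition {α κ : Type} [DecidableEq κ] (xs : List α) (f : α → κ)
    (Q : α → Bool) (ks : List κ) (hnd : ks.Nodup) (hcov : ∀ a ∈ xs, Q a → f a ∈ ks) :
    (ks.map (fun c => xs.countP (fun a => decide (f a = c) && Q a))).sum = xs.countP Q := by
  revert hnd hcov
  induction ks generalizing Q with
  | nil =>
      intro _ hcov
      simp only [List.map_nil, List.sum_nil]
      symm
      rw [List.countP_eq_zero]
      intro a ha hQ
      exact (List.not_mem_nil (hcov a ha hQ))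
  | cons c ks' ih =>
      intro hnd hcov
      obtain ⟨hc, hnd'⟩ := List.nodup_cons.mp hnd
      simp only [List.map_cons, List.sum_cons]
      have htail : ks'.map (fun c' => xs.countP (fun a => decide (f a = c') && Q a))
          = ks'.map (fun c' => xs.countP (fun a => decide (f a = c')
              && (Q a && !decide (f a = c)))) := by
        apply List.map_congr_left
        intro c' hc'
        apply List.countP_congr
        intro a _
        cases hfa : decide (f a = c')
        · simp [hfa]
        · have hfa' : f a = c' := of_decide_eq_true hfa
          have hne : decide (f a = c) = false := by
            apply decide_eq_false
            intro h
            rw [h] at hfa'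
            exact hc (hfa' ▸ hc')
          simp [hfa, hne]
      rw [htail,
        ih (fun a => Q a && !decide (f a = c)) hnd'
          (by
            intro a ha hQ'
            have h1 : Q a = true := ((Bool.and_eq_true _ _).mp hQ').1
            have h2 : (!decide (f a = c)) = true := ((Bool.and_eq_true _ _).mp hQ').2
            rcases List.mem_cons.mp (hcov a ha h1) with h | h
            · exact absurd h2 (by simp [h])
            · exact h)]
      have hcomm : xs.countP (fun a => decide (f a = c) && Q a)
          = xs.countP (fun a => Q a && decide (f a = c)) := by
        apply List.countP_congr
        intro a _
        simp [Bool.and_comm]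
      rw [hcomm]
      exact countP_split xs Q (fun a => decide (f a = c))


theorem range_trim (n d : Nat) (R : Nat → Bool) :
    (List.range n).countP (fun k => decide (k + d < n) && R k)
      = (List.range (n - d)).countP R := by
  have h1 : (List.range n).countP (fun k => decide (k + d < n) && R k)
      = ((List.range n).filter (fun k => decide (k + d < n))).countP R := by
    rw [List.countP_filter]
    apply List.countP_congr
    intro k _
    simp [Bool.and_comm]
  rw [h1]
  have h2 : (List.range n).filter (fun k => decide (k + d < n)) = List.range (n - d) := by
    rw [show List.range n = List.range (n - d) ++ (List.range (n - (n - d))).map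
        (fun x => (n - d) + x) from by rw [← List.range_add]; congr 1; omega]
    rw [List.filter_append]
    have ha : (List.range (n - d)).filter (fun k => decide (k + d < n)) = List.range (n - d) := by
      rw [List.filter_eq_self]
      intro k hk
      simp only [List.mem_range] at hk
      simp
      omega
    have hb : ((List.range (n - (n - d))).map (fun x => (n - d) + x)).filter
        (fun k => decide (k + d < n)) = [] := by
      rw [List.filter_eq_nil_iff]
      intro k hk
      simp only [List.mem_map, List.mem_range] at hk
      obtain ⟨x, hx, rfl⟩ := hk
      simp
      omega
    rw [ha, hb, List.append_nil]
  rw [h2]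


theorem count_distsB (l : List Char) (d : Nat) (hd : 1 ≤ d) :
    (distsB l).count (d : Int) = mcount l d := by
  unfold distsB
  rw [grp_values]
  rw [List.count_flatMap]
  rw [List.map_map]
  rw [List.map_congr_left (g := fun c => (PySem.List.enumerate l 0).countP
        (fun p => decide (p.2 = c) && decide (p.1 + (d : Int) ∈ Ec l p.2)))
      (by
        intro c _
        simp only [Function.comp_apply]
        rw [count_pairsOf (Ec l c) (pairwise_Ec l c) (d : Int) (by exact_mod_cast hd)]
        have hmap : (Ec l c).countP (fun a => decide (a + (d : Int) ∈ Ec l c))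
            = ((PySem.List.enumerate l 0).filter (fun p => p.2 == c)).countP
                (fun p => decide (p.1 + (d : Int) ∈ Ec l c)) := by
          rw [show (Ec l c).countP (fun a => decide (a + (d : Int) ∈ Ec l c))
              = (((PySem.List.enumerate l 0).filter (fun p => p.2 == c)).map (·.1)).countP
                  (fun a => decide (a + (d : Int) ∈ Ec l c)) from rfl]
          rw [List.countP_map]
          rfl
        rw [hmap, List.countP_filter]
        apply List.countP_congr
        intro p _
        by_cases hc : p.2 = c
        · subst hc
          simp
        · have h1 : (p.2 == c) = false := by simp [hc]
          have h2 : (decide (p.2 = c)) = false := by simp [hc]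
          simp [h1, h2]
        )]
  rw [sum_countP_partition (PySem.List.enumerate l 0) (fun p => p.2)
        (fun p => decide (p.1 + (d : Int) ∈ Ec l p.2)) (PySem.Set.ofList l)
        (PySem.Set.nodup_ofList l)
        (by
          intro p hp _
          obtain ⟨k, hk, rfl⟩ := (PySem.List.mem_enumerate_iff _ _ _).mp hp
          exact (PySem.Set.mem_ofList l _).mpr (List.getElem_mem hk))]
  rw [PySem.List.enumerate_eq_map_pyRange l 'A']
  rw [List.countP_map]
  rw [show PySem.List.len l = ((l.length : Nat) : Int) from rfl]
  rw [PySem.List.pyRange_zero_natCast]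
  rw [List.countP_map]
  unfold mcount
  rw [← range_trim l.length d (fun j => l[j]? == l[j + d]?)]
  apply List.countP_congr
  intro k hk
  rw [List.mem_range] at hk
  simp only [Function.comp_apply]
  rw [PySem.List.pyGetD_natCast]
  rw [List.getD_eq_getElem l 'A' hk]
  simp only [Bool.and_eq_true, decide_eq_true_eq, beq_iff_eq]
  rw [mem_Ec]
  constructor
  · rintro ⟨k', hk', heq, hsome⟩
    have hkk : k' = k + d := by omega
    subst hkk
    refine ⟨hk', ?_⟩
    rw [List.getElem?_eq_getElem hk, hsome]
  · rintro ⟨hlt, heq⟩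
    refine ⟨k + d, hlt, by push_cast; ring, ?_⟩
    rw [← heq, List.getElem?_eq_getElem hk]


theorem mem_distsB_bounds (l : List Char) :
    ∀ e ∈ distsB l, 1 ≤ e ∧ e < (l.length : Int) := by
  intro e he
  unfold distsB at he
  rw [grp_values] at he
  rcases List.mem_flatMap.mp he with ⟨g, hg, heg⟩
  rcases List.mem_map.mp hg with ⟨c, _, rfl⟩
  refine mem_pairsOf_bounds (l.length : Int) (Ec l c) (pairwise_Ec l c) ?_ e heg
  intro x hx
  obtain ⟨k, hk, rfl, _⟩ := (mem_Ec l c x).mp hx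
  constructor
  · exact Int.natCast_nonneg k
  · exact_mod_cast hk


-- ===== VERDICT (by name: the statement is the Claim_ definition above) =====
theorem solve_spec : Claim_equal_solve := by
  unfold Claim_equal_solve
  intro A _
  unfold Spec_solve
  rw [solve_alt_eq]
  have hsolve : solve A = solveLoopA A.toList ((A.toList.length : Nat) : Int)
      (PySem.List.pyRange 0 ((A.toList.length : Nat) : Int) 1) := rfl
  rw [hsolve, solveLoopA_eq]
  have key : ((PySem.List.pyRange 0 ((A.toList.length : Nat) : Int) 1).any
      (fun i => decide (2 ≤ solveCount A.toList ((A.toList.length : Nat) : Int) i)) = true)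
      ↔ ¬ (distsB A.toList).Nodup := by
    constructor
    · intro h
      rcases List.any_eq_true.mp h with ⟨i, hi, hci⟩
      rw [PySem.List.mem_pyRange_one] at hi
      obtain ⟨hi0, hin⟩ := hi
      have hci' : 2 ≤ solveCount A.toList ((A.toList.length : Nat) : Int) i :=
        of_decide_eq_true hci
      obtain ⟨dd, rfl⟩ : ∃ dd : Nat, i = (dd : Int) :=
        ⟨i.toNat, (Int.toNat_of_nonneg hi0).symm⟩
      rcases Nat.eq_zero_or_pos dd with h0 | hpos
      · subst h0
        rw [show ((0 : Nat) : Int) = 0 from rfl, solveCount_zero] at hci'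
        omega
      · rw [solveCount_pos A.toList dd hpos] at hci'
        have hm : 2 ≤ mcount A.toList dd := by exact_mod_cast hci'
        intro hnd
        have hle := List.nodup_iff_count_le_one.mp hnd ((dd : Nat) : Int)
        rw [count_distsB A.toList dd hpos] at hle
        omega
    · intro hnnd
      have hne : ¬ ∀ a : Int, (distsB A.toList).count a ≤ 1 := fun hall =>
        hnnd (List.nodup_iff_count_le_one.mpr hall)
      push_neg at hne
      obtain ⟨e, he2⟩ := hne
      have hmem : e ∈ distsB A.toList := List.count_pos_iff.mp (by omega)
      obtain ⟨he1, hen⟩ := mem_distsB_bounds A.toList e hmem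
      obtain ⟨dd, rfl⟩ : ∃ dd : Nat, e = (dd : Int) :=
        ⟨e.toNat, (Int.toNat_of_nonneg (by omega)).symm⟩
      have hpos : 1 ≤ dd := by exact_mod_cast he1
      apply List.any_eq_true.mpr
      refine ⟨((dd : Nat) : Int), ?_, ?_⟩
      · rw [PySem.List.mem_pyRange_one]
        exact ⟨Int.natCast_nonneg dd, hen⟩
      · apply decide_eq_true
        rw [solveCount_pos A.toList dd hpos]
        have h2 : 2 ≤ (distsB A.toList).count ((dd : Nat) : Int) := by omega
        rw [count_distsB A.toList dd hpos] at h2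
        exact_mod_cast h2
  by_cases hnd : (distsB A.toList).Nodup
  · have hA : ((PySem.List.pyRange 0 ((A.toList.length : Nat) : Int) 1).any
        (fun i => decide (2 ≤ solveCount A.toList ((A.toList.length : Nat) : Int) i))) = false := by
      rw [← Bool.not_eq_true]
      intro hq
      exact (key.mp hq) hnd
    rw [hA]
    simp [hnd]
  · have hA := key.mpr hnd
    rw [hA]
    simp [hnd]
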